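-- pv_equiv track=rewrite | github.com/sushprova/Figure-Extraction | updatedColumn.py | aligned_boxes
-- ===== SOURCE A (Python) =====
-- def aligned_boxes(image_boxes, word_boxes):
--
-- #    Returns:A dictionary where the key is the image box and the value is the closest aligned word box.
-- #    If no aligned word box is found, the value will be None.
--
--     result = {}
--
--     for img in image_boxes:
--         closest_word = None
--         # Initialize with infinity
--         min_y_distance = float('inf')
--
--         for word in word_boxes:
--             # if img[0] == word[0] and word[1] > img[1]:
--             if abs(img[0] - word[0]) <= 5  and word[1] > img[1]:
--                 y_distance = word[1] - img[1]
--
--                 if y_distance < min_y_distance: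
--                     min_y_distance = y_distance
--                     closest_word = word
--
--         #result[tuple(img.values())] = closest_word
--         # img_key = (img['x'], img['y'], img['w'], img['h'])
--         result[img] = closest_word
--     return result
-- ===== SOURCE B (Python) =====
-- def aligned_boxes(image_boxes, word_boxes):
--     # Stable-sort words by y once; the first aligned word at or below an image
--     # in that order is the closest one (stability keeps A's tie-break).
--     order = sorted(word_boxes, key=lambda w: w[1])
--     result = {}
--     for img in image_boxes:
--         x, y = img[0], img[1]
--         result[img] = next((w for w in order if abs(x - w[0]) <= 5 and w[1] > y), None)
--     return result
-- ===== Notes on version B (the rewrite author's own statement) =====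
-- stated objective: alternative
-- what changed: B stable-sorts word_boxes by y once and answers each image box with the FIRST x-aligned word strictly below it in that order (sort stability reproduces A's earliest-index tie-break), replacing A's per-image min-tracking scan over all word boxes.
-- outside the precondition, e.g. on aligned_boxes([(0, 0)], [(100,)]): A returns {(0, 0): None}, B raises IndexError; on aligned_boxes([(7,)], []): A returns {(7,): None}, B raises IndexError
import Mathlib
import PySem

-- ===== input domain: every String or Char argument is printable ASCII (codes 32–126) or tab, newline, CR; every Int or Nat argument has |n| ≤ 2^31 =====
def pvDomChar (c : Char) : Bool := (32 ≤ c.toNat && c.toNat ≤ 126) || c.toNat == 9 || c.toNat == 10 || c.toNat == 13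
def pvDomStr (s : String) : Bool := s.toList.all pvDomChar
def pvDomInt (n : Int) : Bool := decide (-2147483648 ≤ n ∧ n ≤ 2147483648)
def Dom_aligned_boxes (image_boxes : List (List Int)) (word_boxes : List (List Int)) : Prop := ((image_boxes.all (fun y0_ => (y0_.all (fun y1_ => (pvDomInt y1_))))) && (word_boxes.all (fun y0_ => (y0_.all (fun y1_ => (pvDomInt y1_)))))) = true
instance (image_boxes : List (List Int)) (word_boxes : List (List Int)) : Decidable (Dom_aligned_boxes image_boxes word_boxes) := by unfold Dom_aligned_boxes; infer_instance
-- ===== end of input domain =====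

-- B stable-sorts the word boxes by y once and takes, per image box, the first aligned word
-- below it in that order, instead of A's per-image min-tracking scan (alternative decomposition).

-- ===== PORT A =====
-- inner loop over word_boxes: state = (closest_word, min_y_distance); none models float('inf')
def pvAInner (img : List Int) (word_boxes : List (List Int)) : Option (List Int) × Option Int :=
  word_boxes.foldl (fun st word =>
    let ix := (PySem.List.pyGet? img 0).getD 0
    let iy := (PySem.List.pyGet? img 1).getD 0
    let wx := (PySem.List.pyGet? word 0).getD 0
    let wy := (PySem.List.pyGet? word 1).getD 0
    if (ix - wx).natAbs ≤ 5 ∧ wy > iy then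
      let y_distance := wy - iy
      if (match st.2 with | none => true | some m => decide (y_distance < m)) = true then
        (some word, some y_distance)
      else st
    else st) (none, none)

def aligned_boxes (image_boxes : List (List Int)) (word_boxes : List (List Int)) : List (List Int × Option (List Int)) :=
  (image_boxes.foldl (fun (result : PySem.Dict (List Int) (Option (List Int))) img =>
      result.insert img (pvAInner img word_boxes).1) PySem.Dict.empty).items

-- ===== PORT B =====
def aligned_boxes_alt (image_boxes : List (List Int)) (word_boxes : List (List Int)) : List (List Int × Option (List Int)) :=
  let order := PySem.List.sorted word_boxes (fun w => (PySem.List.pyGet? w 1).getD 0) false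
  (image_boxes.foldl (fun (result : PySem.Dict (List Int) (Option (List Int))) img =>
      let x := (PySem.List.pyGet? img 0).getD 0
      let y := (PySem.List.pyGet? img 1).getD 0
      result.insert img (order.find? (fun w =>
        decide ((x - (PySem.List.pyGet? w 0).getD 0).natAbs ≤ 5 ∧ (PySem.List.pyGet? w 1).getD 0 > y)))) PySem.Dict.empty).items

-- ===== PRECONDITION & SPEC =====
-- Pre_ excludes boxes with fewer than 2 coordinates: A happens to return there whenever its lazy
-- reads skip the short box (a word box that never x-matches, or an image box with no word boxes),
-- while B's sort key and scan read coordinates of every box and raise IndexError; on the remaining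
-- short-box inputs A itself raises IndexError.
def Pre_aligned_boxes (image_boxes : List (List Int)) (word_boxes : List (List Int)) : Prop :=
  (∀ b ∈ image_boxes, 2 ≤ b.length) ∧ (∀ w ∈ word_boxes, 2 ≤ w.length)
instance (image_boxes : List (List Int)) (word_boxes : List (List Int)) : Decidable (Pre_aligned_boxes image_boxes word_boxes) := by unfold Pre_aligned_boxes; infer_instance

def pvWitness_aligned_boxes : List (List Int) × List (List Int) := ([[0, 0, 10, 10]], [[1, 6, 2, 2]])

def Spec_aligned_boxes (image_boxes : List (List Int)) (word_boxes : List (List Int)) (out : List (List Int × Option (List Int))) : Prop := out = aligned_boxes_alt image_boxes word_boxes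
instance (image_boxes : List (List Int)) (word_boxes : List (List Int)) (out : List (List Int × Option (List Int))) : Decidable (Spec_aligned_boxes image_boxes word_boxes out) := by unfold Spec_aligned_boxes; infer_instance

-- ===== CLAIM (what is proved, stated in full; the proofs are below) =====
def Claim_equal_aligned_boxes : Prop := ∀ (image_boxes : List (List Int)) (word_boxes : List (List Int)), Dom_aligned_boxes image_boxes word_boxes → Pre_aligned_boxes image_boxes word_boxes → Spec_aligned_boxes image_boxes word_boxes (aligned_boxes image_boxes word_boxes)

-- ===== LEMMAS AND PROOFS =====

-- find? over a stable insertion of w into a key-sorted list: w wins exactly when it satisfies P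
-- and its key strictly beats the first P-element's key (stability: ties keep the old element).
lemma pv_find?_insertBy (P : List Int → Bool) (key : List Int → Int) (w : List Int)
    (s : List (List Int)) (hs : s.Pairwise (fun a b => key a ≤ key b)) :
    (PySem.List.insertBy (fun a b => decide (key a < key b)) w s).find? P =
      if P w then
        (match s.find? P with
         | some v => if key w < key v then some w else some v
         | none => some w)
      else s.find? P := by
  induction s with
  | nil =>
    cases hPw : P w <;> simp [PySem.List.insertBy, List.find?, hPw]
  | cons b s' ih =>
    have hb : ∀ a ∈ s', key b ≤ key a := fun a ha => (List.pairwise_cons.mp hs).1 a ha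
    have hs' : s'.Pairwise (fun a b => key a ≤ key b) := (List.pairwise_cons.mp hs).2
    by_cases hlt : key w < key b
    · rw [show PySem.List.insertBy (fun a b => decide (key a < key b)) w (b :: s')
            = w :: b :: s' from by simp [PySem.List.insertBy, hlt]]
      cases hPw : P w with
      | false =>
        rw [List.find?_cons_of_neg (by simp [hPw])]
        simp
      | true =>
        rw [List.find?_cons_of_pos hPw]
        cases hfb : (b :: s').find? P with
        | none => simp
        | some v =>
          have hv : v ∈ b :: s' := List.mem_of_find?_eq_some hfb
          have h1 : key b ≤ key v := by
            rcases List.mem_cons.mp hv with h | h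
            · exact le_of_eq (congrArg key h.symm)
            · exact hb v h
          have h2 : key w < key v := lt_of_lt_of_le hlt h1
          simp [h2]
    · rw [show PySem.List.insertBy (fun a b => decide (key a < key b)) w (b :: s')
            = b :: PySem.List.insertBy (fun a b => decide (key a < key b)) w s' from by
          simp [PySem.List.insertBy, hlt]]
      cases hPb : P b with
      | true =>
        rw [List.find?_cons_of_pos hPb, List.find?_cons_of_pos hPb]
        cases hPw : P w <;> simp [hlt]
      | false =>
        rw [List.find?_cons_of_neg (by simp [hPb]), List.find?_cons_of_neg (by simp [hPb])]
        exact ih hs'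

-- A's min-tracking fold over l computes exactly B's "first match in the y-sorted order",
-- paired with its y-distance.
lemma pvAInner_eq (img : List Int) (l : List (List Int)) :
    pvAInner img l =
      (match (PySem.List.sorted l (fun w => (PySem.List.pyGet? w 1).getD 0) false).find?
          (fun w => decide (((PySem.List.pyGet? img 0).getD 0 - (PySem.List.pyGet? w 0).getD 0).natAbs ≤ 5
            ∧ (PySem.List.pyGet? w 1).getD 0 > (PySem.List.pyGet? img 1).getD 0)) with
       | none => (none, none)
       | some v => (some v, some ((PySem.List.pyGet? v 1).getD 0 - (PySem.List.pyGet? img 1).getD 0))) := by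
  induction l using List.reverseRecOn with
  | nil => simp [pvAInner, PySem.List.sorted]
  | append_singleton l w ih =>
    rw [show PySem.List.sorted (l ++ [w]) (fun w => (PySem.List.pyGet? w 1).getD 0) false
          = PySem.List.insertBy
              (fun a b => decide ((PySem.List.pyGet? a 1).getD 0 < (PySem.List.pyGet? b 1).getD 0))
              w (PySem.List.sorted l (fun w => (PySem.List.pyGet? w 1).getD 0) false) from by
        rw [PySem.List.sorted_eq_foldl_insertBy, PySem.List.sorted_eq_foldl_insertBy,
          List.foldl_append, List.foldl_cons, List.foldl_nil]]
    rw [pv_find?_insertBy _ _ _ _ (PySem.List.sorted_pairwise l _)]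
    rw [pvAInner, List.foldl_append, List.foldl_cons, List.foldl_nil, ← pvAInner, ih]
    cases hf : (PySem.List.sorted l (fun w => (PySem.List.pyGet? w 1).getD 0) false).find?
        (fun w => decide (((PySem.List.pyGet? img 0).getD 0 - (PySem.List.pyGet? w 0).getD 0).natAbs ≤ 5
          ∧ (PySem.List.pyGet? w 1).getD 0 > (PySem.List.pyGet? img 1).getD 0)) with
    | none =>
      by_cases hPw : ((PySem.List.pyGet? img 0).getD 0 - (PySem.List.pyGet? w 0).getD 0).natAbs ≤ 5
          ∧ (PySem.List.pyGet? w 1).getD 0 > (PySem.List.pyGet? img 1).getD 0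
      · simp [hPw]
      · simp [hPw]
    | some v =>
      by_cases hPw : ((PySem.List.pyGet? img 0).getD 0 - (PySem.List.pyGet? w 0).getD 0).natAbs ≤ 5
          ∧ (PySem.List.pyGet? w 1).getD 0 > (PySem.List.pyGet? img 1).getD 0
      · by_cases hk : (PySem.List.pyGet? w 1).getD 0 < (PySem.List.pyGet? v 1).getD 0
        · have : (PySem.List.pyGet? w 1).getD 0 - (PySem.List.pyGet? img 1).getD 0
              < (PySem.List.pyGet? v 1).getD 0 - (PySem.List.pyGet? img 1).getD 0 := by omega
          simp [hPw, hk, this]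
        · have : ¬ ((PySem.List.pyGet? w 1).getD 0 - (PySem.List.pyGet? img 1).getD 0
              < (PySem.List.pyGet? v 1).getD 0 - (PySem.List.pyGet? img 1).getD 0) := by omega
          simp [hPw, hk, this]
      · simp [hPw]

-- ===== VERDICT (by name: the statement is the Claim_ definition above) =====
theorem aligned_boxes_spec : Claim_equal_aligned_boxes := by
  intro ibs wbs _ _
  show _ = aligned_boxes_alt ibs wbs
  unfold aligned_boxes aligned_boxes_alt
  have hfun : ∀ (result : PySem.Dict (List Int) (Option (List Int))) (img : List Int),
      result.insert img (pvAInner img wbs).1 =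
      result.insert img ((PySem.List.sorted wbs (fun w => (PySem.List.pyGet? w 1).getD 0) false).find?
        (fun w => decide (((PySem.List.pyGet? img 0).getD 0 - (PySem.List.pyGet? w 0).getD 0).natAbs ≤ 5
          ∧ (PySem.List.pyGet? w 1).getD 0 > (PySem.List.pyGet? img 1).getD 0))) := by
    intro result img
    rw [pvAInner_eq]
    cases (PySem.List.sorted wbs (fun w => (PySem.List.pyGet? w 1).getD 0) false).find?
        (fun w => decide (((PySem.List.pyGet? img 0).getD 0 - (PySem.List.pyGet? w 0).getD 0).natAbs ≤ 5
          ∧ (PySem.List.pyGet? w 1).getD 0 > (PySem.List.pyGet? img 1).getD 0)) <;> rfl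
  exact congrArg PySem.Dict.items (PySem.List.foldl_congr_mem ibs _ _ _ (fun acc img _ => hfun acc img))
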